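-- pv_equiv track=rewrite | github.com/Caicell/CHAID | Splitter.py | get_path_for_col_ord
-- ===== SOURCE A (Python) =====
-- def get_path_for_col_ord(non_visited):
--     non_visited = sorted(non_visited)
--     return_lst = [
--         [[non_visited[0]]]
--     ]
--     for i in range(1, len(non_visited)):
--         n = len(return_lst)
--         for j in range(n):
--             path_until_i = return_lst[j]
--             jump_path = [part_path[:] for part_path in path_until_i] + [[non_visited[i]]]
--             path_until_i[-1].append(non_visited[i])
--             return_lst.append(jump_path)
--     return return_lst
-- ===== SOURCE B (Python) =====
-- def get_path_for_col_ord(non_visited):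
--     xs = sorted(non_visited)
--     head, rest = xs[0], xs[1:]
--     result = []
--     for idx in range(2 ** len(rest)):
--         part = [[head]]
--         bits = idx
--         for x in rest:
--             if bits % 2 == 1:
--                 part.append([x])
--             else:
--                 part[-1].append(x)
--             bits //= 2
--         result.append(part)
--     return result
-- ===== Notes on version B (the rewrite author's own statement) =====
-- stated objective: alternative
-- what changed: B enumerates the 2^(n-1) consecutive-group partitions directly from the bits of a counter (bit i-1 of the index decides whether sorted element i starts a new group), replacing A's incremental doubling of a list of partial partitions mutated in place; Pre_ excludes the empty list, on which both programs raise IndexError.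
import Mathlib
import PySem

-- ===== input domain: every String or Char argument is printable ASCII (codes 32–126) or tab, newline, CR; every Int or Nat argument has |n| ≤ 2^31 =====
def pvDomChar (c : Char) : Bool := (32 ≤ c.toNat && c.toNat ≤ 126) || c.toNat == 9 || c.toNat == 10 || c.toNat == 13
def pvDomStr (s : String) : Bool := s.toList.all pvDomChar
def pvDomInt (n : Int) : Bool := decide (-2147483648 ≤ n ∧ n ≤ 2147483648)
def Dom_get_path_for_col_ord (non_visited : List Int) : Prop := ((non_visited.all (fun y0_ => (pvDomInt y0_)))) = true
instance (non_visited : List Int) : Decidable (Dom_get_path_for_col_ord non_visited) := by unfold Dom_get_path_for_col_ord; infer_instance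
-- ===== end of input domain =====

-- B replaces A's incremental doubling (with in-place mutation) by direct bit-indexed
-- enumeration of the 2^(n-1) partitions; same output, same order (objective: alternative).

-- ===== PORT A =====
-- path_until_i[-1].append(x) — append x to the last group (both Pythons do this step)
def pvAppendLast (p : List (List Int)) (x : Int) : List (List Int) :=
  match p with
  | [] => []
  | [g] => [g ++ [x]]
  | g :: gs => g :: pvAppendLast gs x

-- A's inner loop over j: each existing path is mutated in place (x joins its last group)
-- and its pre-mutation copy extended by the new group [x] is appended at the end.
def pvStepA (return_lst : List (List (List Int))) (x : Int) : List (List (List Int)) :=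
  return_lst.map (fun path_until_i => pvAppendLast path_until_i x)
    ++ return_lst.map (fun path_until_i => path_until_i ++ [[x]])

def get_path_for_col_ord (non_visited : List Int) : List (List (List Int)) :=
  let nv := PySem.List.sorted non_visited (fun v => v) false
  (PySem.List.pyRange 1 (PySem.List.len nv) 1).foldl
    (fun return_lst i => pvStepA return_lst (PySem.List.pyGetD nv i 0))
    [[[PySem.List.pyGetD nv 0 0]]]

-- ===== PORT B =====
-- B's inner loop body: place x by the lowest remaining bit, then shift the bits.
def pvStepB (st : List (List Int) × Int) (x : Int) : List (List Int) × Int :=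
  ((if PySem.Int.mod st.2 2 == 1 then st.1 ++ [[x]] else pvAppendLast st.1 x),
   PySem.Int.floordiv st.2 2)

def get_path_for_col_ord_alt (non_visited : List Int) : List (List (List Int)) :=
  let xs := PySem.List.sorted non_visited (fun v => v) false
  let head := PySem.List.pyGetD xs 0 0
  let rest := PySem.List.slice xs (some 1) none
  (PySem.List.pyRange 0 ((2 : Int) ^ rest.length) 1).map
    (fun idx => (rest.foldl pvStepB ([[head]], idx)).1)

-- ===== PRECONDITION & SPEC =====
-- Pre_ excludes exactly the empty list, on which A raises IndexError (B raises too).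
def Pre_get_path_for_col_ord (non_visited : List Int) : Prop := non_visited ≠ []
instance (non_visited : List Int) : Decidable (Pre_get_path_for_col_ord non_visited) := by
  unfold Pre_get_path_for_col_ord; infer_instance
def pvWitness_get_path_for_col_ord : List Int := [3, 1, 2]
def Spec_get_path_for_col_ord (non_visited : List Int) (out : List (List (List Int))) : Prop := out = get_path_for_col_ord_alt non_visited
instance (non_visited : List Int) (out : List (List (List Int))) : Decidable (Spec_get_path_for_col_ord non_visited out) := by unfold Spec_get_path_for_col_ord; infer_instance

-- ===== CLAIM (what is proved, stated in full; the proofs are below) =====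
def Claim_equal_get_path_for_col_ord : Prop := ∀ (non_visited : List Int), Dom_get_path_for_col_ord non_visited → Pre_get_path_for_col_ord non_visited → Spec_get_path_for_col_ord non_visited (get_path_for_col_ord non_visited)

-- ===== LEMMAS AND PROOFS =====

-- After folding pvStepB over t, the bit accumulator holds m / 2^|t|.
theorem pvBitsAfter (t : List Int) : ∀ (p : List (List Int)) (m : Nat),
    (t.foldl pvStepB (p, (m : Int))).2 = ((m / 2 ^ t.length : Nat) : Int) := by
  induction t with
  | nil => intro p m; simp
  | cons x t ih =>
    intro p m
    have h2 : PySem.Int.floordiv (m : Int) 2 = ((m / 2 : Nat) : Int) := by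
      exact_mod_cast PySem.Int.floordiv_natCast m 2
    simp only [List.foldl_cons, pvStepB, h2, ih]
    congr 1
    rw [Nat.div_div_eq_div_mul]
    congr 1
    rw [List.length_cons, pow_succ]
    ring

-- The partition built from bits m depends only on m's lowest |t| bits.
theorem pvLowBits (t : List Int) : ∀ (p : List (List Int)) (m : Nat),
    (t.foldl pvStepB (p, ((m % 2 ^ t.length : Nat) : Int))).1
      = (t.foldl pvStepB (p, (m : Int))).1 := by
  induction t with
  | nil => intro p m; simp
  | cons x t ih =>
    intro p m
    have hlen : (x :: t).length = t.length + 1 := rfl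
    have hmod2 : ∀ (k : Nat), PySem.Int.mod (k : Int) 2 = ((k % 2 : Nat) : Int) := by
      intro k; exact_mod_cast PySem.Int.mod_natCast k 2
    have hdiv2 : ∀ (k : Nat), PySem.Int.floordiv (k : Int) 2 = ((k / 2 : Nat) : Int) := by
      intro k; exact_mod_cast PySem.Int.floordiv_natCast k 2
    have hbit : (m % 2 ^ (x :: t).length) % 2 = m % 2 := by
      rw [hlen]; exact Nat.mod_mod_of_dvd m ⟨2 ^ t.length, by ring⟩
    have hshift : (m % 2 ^ (x :: t).length) / 2 = (m / 2) % 2 ^ t.length := by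
      rw [hlen, pow_succ, mul_comm]
      exact Nat.mod_mul_right_div_self m 2 (2 ^ t.length)
    simp only [List.foldl_cons, pvStepB, hmod2, hdiv2, hbit, hshift]
    rw [ih]

-- Main invariant: A's doubling fold equals B's bit enumeration, for any seed path.
theorem pvMain (t : List Int) (p : List (List Int)) :
    t.foldl pvStepA [p]
      = (PySem.List.pyRange 0 ((2 : Int) ^ t.length) 1).map
          (fun idx => (t.foldl pvStepB (p, idx)).1) := by
  induction t using List.reverseRecOn with
  | nil =>
    simp
  | append_singleton t x ih =>
    have hN : ((2 : Int) ^ t.length) = ((2 ^ t.length : Nat) : Int) := by push_cast; ring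
    have hN1 : ((2 : Int) ^ (t ++ [x]).length) = ((2 ^ (t.length + 1) : Nat) : Int) := by
      simp
    rw [List.foldl_append, ih, hN1,
        PySem.List.pyRange_one_append 0 ((2 ^ t.length : Nat) : Int) ((2 ^ (t.length + 1) : Nat) : Int)
          (by positivity) (by exact_mod_cast Nat.pow_le_pow_right (by norm_num) (by omega)),
        List.map_append]
    show pvStepA _ x = _
    simp only [pvStepA, List.map_map]
    congr 1
    · -- first halves: idx < 2^|t|, highest bit 0, x joins the last group
      rw [hN, PySem.List.pyRange_one, List.map_map, List.map_map]
      refine List.map_congr_left ?_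
      intro k hk
      rw [List.mem_range] at hk
      simp only [Function.comp_apply, zero_add, List.foldl_append, List.foldl_cons, List.foldl_nil]
      have hb := pvBitsAfter t p k
      have hdiv : k / 2 ^ t.length = 0 := Nat.div_eq_of_lt hk
      simp [pvStepB, hb, hdiv, PySem.Int.mod]
    · -- second halves: idx = 2^|t| + k, highest bit 1, [x] becomes a new group
      rw [hN, PySem.List.pyRange_one ((2 ^ t.length : Nat) : Int), PySem.List.pyRange_one 0,
          List.map_map, List.map_map]
      have hle : 2 ^ t.length ≤ 2 ^ (t.length + 1) := Nat.pow_le_pow_right (by norm_num) (by omega)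
      have hlen : (((2 ^ (t.length + 1) : Nat) : Int) - ((2 ^ t.length : Nat) : Int)).toNat
          = 2 ^ t.length := by
        rw [← Nat.cast_sub hle, Int.toNat_natCast, pow_succ]; omega
      have hlen0 : ((((2 ^ t.length : Nat) : Int)) - 0).toNat = 2 ^ t.length := by
        rw [sub_zero, Int.toNat_natCast]
      rw [hlen, hlen0]
      refine List.map_congr_left ?_
      intro k hk
      rw [List.mem_range] at hk
      simp only [Function.comp_apply, zero_add, List.foldl_append, List.foldl_cons, List.foldl_nil]
      have hcast : ((2 ^ t.length : Nat) : Int) + (k : Int) = ((2 ^ t.length + k : Nat) : Int) := by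
        push_cast; ring
      have hdiv : (2 ^ t.length + k) / 2 ^ t.length = 1 := by
        rw [Nat.add_div_left k (by positivity), Nat.div_eq_of_lt hk]
      have hb : (t.foldl pvStepB (p, ((2 ^ t.length : Nat) : Int) + (k : Int))).2 = 1 := by
        rw [hcast, pvBitsAfter t p (2 ^ t.length + k), hdiv]; norm_num
      have hmodk : (2 ^ t.length + k) % 2 ^ t.length = k := by
        rw [Nat.add_mod_left, Nat.mod_eq_of_lt hk]
      have hlow : (t.foldl pvStepB (p, (k : Int))).1
          = (t.foldl pvStepB (p, ((2 ^ t.length : Nat) : Int) + (k : Int))).1 := by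
        have h := pvLowBits t p (2 ^ t.length + k)
        rw [hmodk] at h
        rw [hcast, h]
      show (t.foldl pvStepB (p, (k : Int))).1 ++ [[x]]
          = (pvStepB (t.foldl pvStepB (p, ((2 ^ t.length : Nat) : Int) + (k : Int))) x).1
      simp only [pvStepB]
      rw [hb, hlow]
      norm_num [PySem.Int.mod]
      exact fun h => absurd (by decide) h

-- ===== VERDICT (by name: the statement is the Claim_ definition above) =====
theorem get_path_for_col_ord_spec : Claim_equal_get_path_for_col_ord := by
  intro non_visited hdom hpre
  unfold Spec_get_path_for_col_ord
  unfold Pre_get_path_for_col_ord at hpre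
  unfold get_path_for_col_ord get_path_for_col_ord_alt
  have hne : PySem.List.sorted non_visited (fun v => v) false ≠ [] := by
    rw [Ne, PySem.List.sorted_eq_nil_iff]; exact hpre
  obtain ⟨h, t, hnv⟩ := List.exists_cons_of_ne_nil hne
  rw [hnv]
  simp only [PySem.List.len_eq]
  rw [PySem.List.foldl_pyRange_pyGetD' (h :: t) 0 pvStepA _ (by norm_num)]
  rw [PySem.List.slice_from_one]
  simp only [PySem.List.pyGetD_zero_cons, List.tail_cons, List.drop_one, Int.toNat_one]
  exact pvMain t [[h]]
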